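-- pv_equiv track=rewrite | github.com/Sharp-Lee/X-Signal | src/xsignal/strategies/volume_price_efficiency_v1/live/status.py | parse_journal_summary
-- ===== SOURCE A (Python) =====
-- def parse_journal_summary(output: str) -> dict[str, int]:
--     summary = _empty_journal_summary()
--     for line in output.splitlines():
--         if "Started xsignal-vpe-" in line and "stream-daemon.service" in line:
--             summary = _empty_journal_summary()
--             continue
--         if "reconcile_pass" in line and '"status": "clean"' in line:
--             summary["reconcile_clean"] += 1
--             summary["reconcile_error_since_clean"] = 0
--             summary["stream_errors_since_clean"] = 0
--             summary["rest_429_since_clean"] = 0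
--             summary["user_data_stream_errors_since_clean"] = 0
--         if "reconcile_pass" in line and '"status": "error"' in line:
--             summary["reconcile_error"] += 1
--             summary["reconcile_error_since_clean"] += 1
--         if '"event": "stream_error"' in line:
--             summary["stream_errors"] += 1
--             summary["stream_errors_since_clean"] += 1
--         if "-1003" in line or " 429 " in line:
--             summary["rest_429"] += 1
--             summary["rest_429_since_clean"] += 1
--         if '"event": "stream_connected"' in line:
--             summary["stream_connected"] += 1
--         if '"event": "user_data_stream_connected"' in line:
--             summary["user_data_stream_connected"] += 1
--         if '"event": "user_data_stream_error"' in line: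
--             summary["user_data_stream_errors"] += 1
--             summary["user_data_stream_errors_since_clean"] += 1
--         if '"event": "strategy_action"' in line:
--             summary["strategy_actions"] += 1
--     return summary
--
-- def _empty_journal_summary() -> dict[str, int]:
--     return {
--         "reconcile_clean": 0,
--         "reconcile_error": 0,
--         "reconcile_error_since_clean": 0,
--         "stream_errors": 0,
--         "stream_errors_since_clean": 0,
--         "user_data_stream_connected": 0,
--         "user_data_stream_errors": 0,
--         "user_data_stream_errors_since_clean": 0,
--         "rest_429": 0,
--         "rest_429_since_clean": 0,
--         "stream_connected": 0,
--         "strategy_actions": 0,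
--     }
-- ===== SOURCE B (Python) =====
-- def parse_journal_summary(output: str) -> dict[str, int]:
--     restart = lambda l: "Started xsignal-vpe-" in l and "stream-daemon.service" in l
--     clean = lambda l: "reconcile_pass" in l and '"status": "clean"' in l
--     error = lambda l: "reconcile_pass" in l and '"status": "error"' in l
--     stream_err = lambda l: '"event": "stream_error"' in l
--     rest_429 = lambda l: "-1003" in l or " 429 " in l
--     stream_conn = lambda l: '"event": "stream_connected"' in l
--     uds_conn = lambda l: '"event": "user_data_stream_connected"' in l
--     uds_err = lambda l: '"event": "user_data_stream_error"' in l
--     action = lambda l: '"event": "strategy_action"' in l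
--
--     # segment after the last daemon restart line (restart lines themselves are dropped)
--     seg = []
--     for line in output.splitlines():
--         if restart(line):
--             seg = []
--         else:
--             seg.append(line)
--     # suffix from the last clean reconcile pass, inclusive (whole segment if none)
--     tail = []
--     for line in seg:
--         if clean(line):
--             tail = []
--         tail.append(line)
--
--     count = lambda ls, pred: sum(1 for l in ls if pred(l))
--     return {
--         "reconcile_clean": count(seg, clean),
--         "reconcile_error": count(seg, error),
--         "reconcile_error_since_clean": count(tail, error),
--         "stream_errors": count(seg, stream_err),
--         "stream_errors_since_clean": count(tail, stream_err),
--         "user_data_stream_connected": count(seg, uds_conn),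
--         "user_data_stream_errors": count(seg, uds_err),
--         "user_data_stream_errors_since_clean": count(tail, uds_err),
--         "rest_429": count(seg, rest_429),
--         "rest_429_since_clean": count(tail, rest_429),
--         "stream_connected": count(seg, stream_conn),
--         "strategy_actions": count(seg, action),
--     }
-- ===== Notes on version B (the rewrite author's own statement) =====
-- stated objective: alternative
-- what changed: A threads one stateful loop over all lines with 12 mutable counters and in-place resets; B first isolates the segment after the last restart line and the inclusive suffix from the last clean reconcile pass, then computes every field as an independent count over the relevant slice.
import Mathlib
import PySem

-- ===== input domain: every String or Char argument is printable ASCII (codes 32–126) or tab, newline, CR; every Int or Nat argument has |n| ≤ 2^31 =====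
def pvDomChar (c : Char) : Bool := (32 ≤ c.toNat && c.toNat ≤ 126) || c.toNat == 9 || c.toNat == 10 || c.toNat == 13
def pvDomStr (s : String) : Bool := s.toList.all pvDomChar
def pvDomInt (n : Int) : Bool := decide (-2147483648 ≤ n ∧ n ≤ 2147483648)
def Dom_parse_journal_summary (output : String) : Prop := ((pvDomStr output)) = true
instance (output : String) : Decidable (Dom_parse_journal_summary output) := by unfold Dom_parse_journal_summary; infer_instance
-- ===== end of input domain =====

-- B replaces A's single stateful 12-counter loop (with in-place resets) by a segment/suffix
-- decomposition: slice off everything up to the last restart line, take the suffix from the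
-- last clean reconcile pass, and obtain every field as an independent count (objective: alternative).

-- ===== PORT A =====
-- the substring tests both Pythons perform ('sub in line'); shared helpers, one per literal test
def pvRestart (l : String) : Bool := PySem.Str.isIn "Started xsignal-vpe-" l && PySem.Str.isIn "stream-daemon.service" l
def pvClean (l : String) : Bool := PySem.Str.isIn "reconcile_pass" l && PySem.Str.isIn "\"status\": \"clean\"" l
def pvErr (l : String) : Bool := PySem.Str.isIn "reconcile_pass" l && PySem.Str.isIn "\"status\": \"error\"" l
def pvStreamErr (l : String) : Bool := PySem.Str.isIn "\"event\": \"stream_error\"" l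
def pv429 (l : String) : Bool := PySem.Str.isIn "-1003" l || PySem.Str.isIn " 429 " l
def pvStreamConn (l : String) : Bool := PySem.Str.isIn "\"event\": \"stream_connected\"" l
def pvUdsConn (l : String) : Bool := PySem.Str.isIn "\"event\": \"user_data_stream_connected\"" l
def pvUdsErr (l : String) : Bool := PySem.Str.isIn "\"event\": \"user_data_stream_error\"" l
def pvAction (l : String) : Bool := PySem.Str.isIn "\"event\": \"strategy_action\"" l

-- _empty_journal_summary()
def pvEmptySummary : PySem.Dict String Int := PySem.Dict.ofList
  [("reconcile_clean", 0), ("reconcile_error", 0), ("reconcile_error_since_clean", 0),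
   ("stream_errors", 0), ("stream_errors_since_clean", 0), ("user_data_stream_connected", 0),
   ("user_data_stream_errors", 0), ("user_data_stream_errors_since_clean", 0), ("rest_429", 0),
   ("rest_429_since_clean", 0), ("stream_connected", 0), ("strategy_actions", 0)]

-- A's loop body: 'continue' after a restart line = reset and skip the remaining tests
def pvStepA (summary : PySem.Dict String Int) (line : String) : PySem.Dict String Int :=
  if pvRestart line then pvEmptySummary
  else
    let s := if pvClean line then
        ((((summary.modify "reconcile_clean" 0 (· + 1)).insert "reconcile_error_since_clean" 0).insert
            "stream_errors_since_clean" 0).insert "rest_429_since_clean" 0).insert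
          "user_data_stream_errors_since_clean" 0
      else summary
    let s := if pvErr line then (s.modify "reconcile_error" 0 (· + 1)).modify "reconcile_error_since_clean" 0 (· + 1) else s
    let s := if pvStreamErr line then (s.modify "stream_errors" 0 (· + 1)).modify "stream_errors_since_clean" 0 (· + 1) else s
    let s := if pv429 line then (s.modify "rest_429" 0 (· + 1)).modify "rest_429_since_clean" 0 (· + 1) else s
    let s := if pvStreamConn line then s.modify "stream_connected" 0 (· + 1) else s
    let s := if pvUdsConn line then s.modify "user_data_stream_connected" 0 (· + 1) else s
    let s := if pvUdsErr line then (s.modify "user_data_stream_errors" 0 (· + 1)).modify "user_data_stream_errors_since_clean" 0 (· + 1) else s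
    if pvAction line then s.modify "strategy_actions" 0 (· + 1) else s

def parse_journal_summary (output : String) : List (String × Int) :=
  ((PySem.Str.splitlines output).foldl pvStepA pvEmptySummary).items

-- ===== PORT B =====
def parse_journal_summary_alt (output : String) : List (String × Int) :=
  -- segment after the last restart line (restart lines themselves are dropped)
  let seg := (PySem.Str.splitlines output).foldl (fun seg line => if pvRestart line then [] else seg ++ [line]) []
  -- suffix from the last clean reconcile pass, inclusive (whole segment if none)
  let tail := seg.foldl (fun tail line => (if pvClean line then [] else tail) ++ [line]) []
  [("reconcile_clean", (seg.countP pvClean : Int)),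
   ("reconcile_error", (seg.countP pvErr : Int)),
   ("reconcile_error_since_clean", (tail.countP pvErr : Int)),
   ("stream_errors", (seg.countP pvStreamErr : Int)),
   ("stream_errors_since_clean", (tail.countP pvStreamErr : Int)),
   ("user_data_stream_connected", (seg.countP pvUdsConn : Int)),
   ("user_data_stream_errors", (seg.countP pvUdsErr : Int)),
   ("user_data_stream_errors_since_clean", (tail.countP pvUdsErr : Int)),
   ("rest_429", (seg.countP pv429 : Int)),
   ("rest_429_since_clean", (tail.countP pv429 : Int)),
   ("stream_connected", (seg.countP pvStreamConn : Int)),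
   ("strategy_actions", (seg.countP pvAction : Int))]

-- ===== PRECONDITION & SPEC =====
def Spec_parse_journal_summary (output : String) (out : List (String × Int)) : Prop := out = parse_journal_summary_alt output
instance (output : String) (out : List (String × Int)) : Decidable (Spec_parse_journal_summary output out) := by unfold Spec_parse_journal_summary; infer_instance

-- ===== CLAIM (what is proved, stated in full; the proofs are below) =====
def Claim_equal_parse_journal_summary : Prop := ∀ (output : String), Dom_parse_journal_summary output → Spec_parse_journal_summary output (parse_journal_summary output)

-- ===== LEMMAS AND PROOFS =====

-- A's dict state, as a function of its 12 counter values (keys in _empty_journal_summary's order)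
def pvMkD (rc re resc se sesc uc ue uesc r4 r4sc sc sa : Int) : PySem.Dict String Int := PySem.Dict.mk
  [("reconcile_clean", rc), ("reconcile_error", re), ("reconcile_error_since_clean", resc),
   ("stream_errors", se), ("stream_errors_since_clean", sesc), ("user_data_stream_connected", uc),
   ("user_data_stream_errors", ue), ("user_data_stream_errors_since_clean", uesc), ("rest_429", r4),
   ("rest_429_since_clean", r4sc), ("stream_connected", sc), ("strategy_actions", sa)]

def pvB2i (b : Bool) : Int := if b then 1 else 0

-- the suffix after the last pvRestart line (meaningful when one exists)
def pvRestTail : List String → List String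
  | [] => []
  | _ :: rest => if rest.any pvRestart then pvRestTail rest else rest

-- the suffix from the last pvClean line, inclusive (meaningful when one exists)
def pvCleanTail : List String → List String
  | [] => []
  | l :: rest => if rest.any pvClean then pvCleanTail rest else l :: rest

-- value of a *_since_clean counter after a restart-free list ls, starting from init
def pvSinceV (init : Int) (p : String → Bool) (ls : List String) : Int :=
  if ls.any pvClean then ((pvCleanTail ls).countP p : Int) else init + (ls.countP p : Int)

theorem pvEmpty_eq_mkD : pvEmptySummary = pvMkD 0 0 0 0 0 0 0 0 0 0 0 0 := rfl

theorem pvU_clean (b : Bool) (rc re resc se sesc uc ue uesc r4 r4sc sc sa : Int) :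
    (if b then ((((pvMkD rc re resc se sesc uc ue uesc r4 r4sc sc sa).modify "reconcile_clean" 0
          (· + 1)).insert "reconcile_error_since_clean" 0).insert "stream_errors_since_clean" 0).insert
            "rest_429_since_clean" 0 |>.insert "user_data_stream_errors_since_clean" 0
      else pvMkD rc re resc se sesc uc ue uesc r4 r4sc sc sa) =
    pvMkD (rc + pvB2i b) re (if b then 0 else resc) se (if b then 0 else sesc) uc ue
      (if b then 0 else uesc) r4 (if b then 0 else r4sc) sc sa := by
  cases b <;> simp [pvB2i] <;> rfl

theorem pvU_err (b : Bool) (rc re resc se sesc uc ue uesc r4 r4sc sc sa : Int) :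
    (if b then ((pvMkD rc re resc se sesc uc ue uesc r4 r4sc sc sa).modify "reconcile_error" 0
          (· + 1)).modify "reconcile_error_since_clean" 0 (· + 1)
      else pvMkD rc re resc se sesc uc ue uesc r4 r4sc sc sa) =
    pvMkD rc (re + pvB2i b) (resc + pvB2i b) se sesc uc ue uesc r4 r4sc sc sa := by
  cases b <;> simp [pvB2i] <;> rfl

theorem pvU_se (b : Bool) (rc re resc se sesc uc ue uesc r4 r4sc sc sa : Int) :
    (if b then ((pvMkD rc re resc se sesc uc ue uesc r4 r4sc sc sa).modify "stream_errors" 0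
          (· + 1)).modify "stream_errors_since_clean" 0 (· + 1)
      else pvMkD rc re resc se sesc uc ue uesc r4 r4sc sc sa) =
    pvMkD rc re resc (se + pvB2i b) (sesc + pvB2i b) uc ue uesc r4 r4sc sc sa := by
  cases b <;> simp [pvB2i] <;> rfl

theorem pvU_429 (b : Bool) (rc re resc se sesc uc ue uesc r4 r4sc sc sa : Int) :
    (if b then ((pvMkD rc re resc se sesc uc ue uesc r4 r4sc sc sa).modify "rest_429" 0
          (· + 1)).modify "rest_429_since_clean" 0 (· + 1)
      else pvMkD rc re resc se sesc uc ue uesc r4 r4sc sc sa) =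
    pvMkD rc re resc se sesc uc ue uesc (r4 + pvB2i b) (r4sc + pvB2i b) sc sa := by
  cases b <;> simp [pvB2i] <;> rfl

theorem pvU_sconn (b : Bool) (rc re resc se sesc uc ue uesc r4 r4sc sc sa : Int) :
    (if b then (pvMkD rc re resc se sesc uc ue uesc r4 r4sc sc sa).modify "stream_connected" 0 (· + 1)
      else pvMkD rc re resc se sesc uc ue uesc r4 r4sc sc sa) =
    pvMkD rc re resc se sesc uc ue uesc r4 r4sc (sc + pvB2i b) sa := by
  cases b <;> simp [pvB2i] <;> rfl

theorem pvU_uconn (b : Bool) (rc re resc se sesc uc ue uesc r4 r4sc sc sa : Int) :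
    (if b then (pvMkD rc re resc se sesc uc ue uesc r4 r4sc sc sa).modify "user_data_stream_connected" 0 (· + 1)
      else pvMkD rc re resc se sesc uc ue uesc r4 r4sc sc sa) =
    pvMkD rc re resc se sesc (uc + pvB2i b) ue uesc r4 r4sc sc sa := by
  cases b <;> simp [pvB2i] <;> rfl

theorem pvU_uerr (b : Bool) (rc re resc se sesc uc ue uesc r4 r4sc sc sa : Int) :
    (if b then ((pvMkD rc re resc se sesc uc ue uesc r4 r4sc sc sa).modify "user_data_stream_errors" 0
          (· + 1)).modify "user_data_stream_errors_since_clean" 0 (· + 1)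
      else pvMkD rc re resc se sesc uc ue uesc r4 r4sc sc sa) =
    pvMkD rc re resc se sesc uc (ue + pvB2i b) (uesc + pvB2i b) r4 r4sc sc sa := by
  cases b <;> simp [pvB2i] <;> rfl

theorem pvU_act (b : Bool) (rc re resc se sesc uc ue uesc r4 r4sc sc sa : Int) :
    (if b then (pvMkD rc re resc se sesc uc ue uesc r4 r4sc sc sa).modify "strategy_actions" 0 (· + 1)
      else pvMkD rc re resc se sesc uc ue uesc r4 r4sc sc sa) =
    pvMkD rc re resc se sesc uc ue uesc r4 r4sc sc (sa + pvB2i b) := by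
  cases b <;> simp [pvB2i] <;> rfl

theorem pvStep_mkD (line : String) (h : pvRestart line = false)
    (rc re resc se sesc uc ue uesc r4 r4sc sc sa : Int) :
    pvStepA (pvMkD rc re resc se sesc uc ue uesc r4 r4sc sc sa) line =
      pvMkD (rc + pvB2i (pvClean line)) (re + pvB2i (pvErr line))
        ((if pvClean line then 0 else resc) + pvB2i (pvErr line))
        (se + pvB2i (pvStreamErr line)) ((if pvClean line then 0 else sesc) + pvB2i (pvStreamErr line))
        (uc + pvB2i (pvUdsConn line)) (ue + pvB2i (pvUdsErr line))
        ((if pvClean line then 0 else uesc) + pvB2i (pvUdsErr line))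
        (r4 + pvB2i (pv429 line)) ((if pvClean line then 0 else r4sc) + pvB2i (pv429 line))
        (sc + pvB2i (pvStreamConn line)) (sa + pvB2i (pvAction line)) := by
  simp only [pvStepA, h, Bool.false_eq_true, if_false]
  rw [pvU_clean, pvU_err, pvU_se, pvU_429, pvU_sconn, pvU_uconn, pvU_uerr, pvU_act]

theorem pvCount_cons (v : Int) (p : String → Bool) (l : String) (rest : List String) :
    v + pvB2i (p l) + ((rest.countP p : Nat) : Int) = v + (((l :: rest).countP p : Nat) : Int) := by
  cases hp : p l <;> simp [pvB2i, hp] <;> push_cast <;> ring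

theorem pvSinceV_cons (init : Int) (p : String → Bool) (l : String) (rest : List String) :
    pvSinceV ((if pvClean l then 0 else init) + pvB2i (p l)) p rest = pvSinceV init p (l :: rest) := by
  by_cases hc : pvClean l <;> by_cases hr : rest.any pvClean <;>
    simp [pvSinceV, pvCleanTail, hc, hr, List.countP_cons, pvB2i] <;>
    cases hp : p l <;> simp [hp] <;> push_cast <;> ring

theorem pvFold_mkD (ls : List String) (h : ∀ l ∈ ls, pvRestart l = false)
    (rc re resc se sesc uc ue uesc r4 r4sc sc sa : Int) :
    ls.foldl pvStepA (pvMkD rc re resc se sesc uc ue uesc r4 r4sc sc sa) =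
      pvMkD (rc + ls.countP pvClean) (re + ls.countP pvErr) (pvSinceV resc pvErr ls)
        (se + ls.countP pvStreamErr) (pvSinceV sesc pvStreamErr ls)
        (uc + ls.countP pvUdsConn) (ue + ls.countP pvUdsErr) (pvSinceV uesc pvUdsErr ls)
        (r4 + ls.countP pv429) (pvSinceV r4sc pv429 ls)
        (sc + ls.countP pvStreamConn) (sa + ls.countP pvAction) := by
  induction ls generalizing rc re resc se sesc uc ue uesc r4 r4sc sc sa with
  | nil => simp [pvSinceV]
  | cons l rest ih =>
    rw [List.foldl_cons, pvStep_mkD l (h l List.mem_cons_self),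
      ih (fun x hx => h x (List.mem_cons_of_mem l hx)),
      pvSinceV_cons, pvSinceV_cons, pvSinceV_cons, pvSinceV_cons,
      pvCount_cons, pvCount_cons, pvCount_cons, pvCount_cons,
      pvCount_cons, pvCount_cons, pvCount_cons, pvCount_cons]

theorem pvStep_restart (s : PySem.Dict String Int) (line : String) (h : pvRestart line = true) :
    pvStepA s line = pvEmptySummary := by simp [pvStepA, h]

theorem pvFoldA_restart (ls : List String) (s : PySem.Dict String Int) (h : ls.any pvRestart = true) :
    ls.foldl pvStepA s = (pvRestTail ls).foldl pvStepA pvEmptySummary := by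
  induction ls generalizing s with
  | nil => simp at h
  | cons l rest ih =>
    by_cases hr : rest.any pvRestart
    · rw [List.foldl_cons, ih _ hr]; simp [pvRestTail, hr]
    · have hl : pvRestart l = true := by simp [hr] at h; tauto
      rw [List.foldl_cons, pvStep_restart _ _ hl]
      simp [pvRestTail, hr]

theorem pvRestTail_no (ls : List String) (h : ls.any pvRestart = true) :
    ∀ l ∈ pvRestTail ls, pvRestart l = false := by
  induction ls with
  | nil => simp at h
  | cons l rest ih =>
    by_cases hr : rest.any pvRestart
    · simpa [pvRestTail, hr] using ih hr
    · have : ∀ x ∈ rest, pvRestart x = false := by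
        simpa [List.any_eq_false] using hr
      simpa [pvRestTail, hr] using this

theorem pvSegFold (ls : List String) (acc : List String) :
    ls.foldl (fun seg line => if pvRestart line then [] else seg ++ [line]) acc =
      if ls.any pvRestart then pvRestTail ls else acc ++ ls := by
  induction ls generalizing acc with
  | nil => simp
  | cons l rest ih =>
    by_cases hl : pvRestart l <;> by_cases hr : rest.any pvRestart <;>
      simp [List.foldl_cons, hl, hr, ih, pvRestTail]

theorem pvTailFold (ls : List String) (acc : List String) :
    ls.foldl (fun tail line => (if pvClean line then [] else tail) ++ [line]) acc =
      if ls.any pvClean then pvCleanTail ls else acc ++ ls := by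
  induction ls generalizing acc with
  | nil => simp
  | cons l rest ih =>
    by_cases hl : pvClean l <;> by_cases hr : rest.any pvClean <;>
      simp [List.foldl_cons, hl, hr, ih, pvCleanTail]

theorem pvCounts_eq (seg : List String) (h : ∀ l ∈ seg, pvRestart l = false) :
    (seg.foldl pvStepA pvEmptySummary).items =
      [("reconcile_clean", (seg.countP pvClean : Int)),
       ("reconcile_error", (seg.countP pvErr : Int)),
       ("reconcile_error_since_clean", (((if seg.any pvClean then pvCleanTail seg else seg).countP pvErr : Nat) : Int)),
       ("stream_errors", (seg.countP pvStreamErr : Int)),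
       ("stream_errors_since_clean", (((if seg.any pvClean then pvCleanTail seg else seg).countP pvStreamErr : Nat) : Int)),
       ("user_data_stream_connected", (seg.countP pvUdsConn : Int)),
       ("user_data_stream_errors", (seg.countP pvUdsErr : Int)),
       ("user_data_stream_errors_since_clean", (((if seg.any pvClean then pvCleanTail seg else seg).countP pvUdsErr : Nat) : Int)),
       ("rest_429", (seg.countP pv429 : Int)),
       ("rest_429_since_clean", (((if seg.any pvClean then pvCleanTail seg else seg).countP pv429 : Nat) : Int)),
       ("stream_connected", (seg.countP pvStreamConn : Int)),
       ("strategy_actions", (seg.countP pvAction : Int))] := by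
  rw [pvEmpty_eq_mkD, pvFold_mkD seg h]
  by_cases hc : seg.any pvClean <;> simp [pvMkD, pvSinceV, hc]

-- ===== VERDICT (by name: the statement is the Claim_ definition above) =====
theorem parse_journal_summary_spec : Claim_equal_parse_journal_summary := by
  intro output _
  unfold Spec_parse_journal_summary parse_journal_summary parse_journal_summary_alt
  simp only [pvSegFold, pvTailFold]
  by_cases hr : (PySem.Str.splitlines output).any pvRestart
  · rw [pvFoldA_restart _ _ hr, pvCounts_eq _ (pvRestTail_no _ hr)]
    simp [hr]
  · rw [pvCounts_eq _ (by simpa [List.any_eq_false] using hr)]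
    simp [hr]
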